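-- pv_equiv track=rewrite | github.com/iamprasadraju/CrackATS | groq_client.py | extract_resume_sections
-- ===== SOURCE A (Python) =====
-- def extract_resume_sections(latex_content: str) -> dict[str, str]:
--     """Extract key sections from LaTeX resume for cover letter context.
--
--     Args:
--         latex_content: LaTeX resume content
--
--     Returns:
--         Dict with extracted sections
--     """
--     sections: dict[str, str] = {"skills": "", "experience": "", "education": ""}
--
--     lines = latex_content.split("\n")
--     current_section: str | None = None
--     section_buffer: list[str] = []
--
--     for line in lines:
--         line = line.strip()
--         if "\\section{" in line.lower() or "\\section*{" in line.lower():
--             if current_section and section_buffer: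
--                 sections[current_section] = "\n".join(section_buffer)
--             section_buffer = []
--
--             lower_line = line.lower()
--             if "skill" in lower_line:
--                 current_section = "skills"
--             elif "experience" in lower_line or "work" in lower_line:
--                 current_section = "experience"
--             elif "education" in lower_line:
--                 current_section = "education"
--             else:
--                 current_section = None
--         elif current_section:
--             section_buffer.append(line)
--
--     if current_section and section_buffer:
--         sections[current_section] = "\n".join(section_buffer)
--
--     return sections
-- ===== SOURCE B (Python) =====
-- def _is_header(line: str) -> bool:
--     ll = line.lower()
--     return "\\section{" in ll or "\\section*{" in ll
--
--
-- def _classify(line: str):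
--     ll = line.lower()
--     if "skill" in ll:
--         return "skills"
--     if "experience" in ll or "work" in ll:
--         return "experience"
--     if "education" in ll:
--         return "education"
--     return None
--
--
-- def extract_resume_sections(latex_content: str) -> dict[str, str]:
--     sections: dict[str, str] = {"skills": "", "experience": "", "education": ""}
--     rest = [ln.strip() for ln in latex_content.split("\n")]
--     # drop everything before the first section header
--     while rest and not _is_header(rest[0]):
--         rest.pop(0)
--     # consume one (header, body) segment at a time
--     while rest:
--         header = rest.pop(0)
--         body = []
--         while rest and not _is_header(rest[0]):
--             body.append(rest.pop(0))
--         key = _classify(header)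
--         if key is not None and body:
--             sections[key] = "\n".join(body)
--     return sections
-- ===== Notes on version B (the rewrite author's own statement) =====
-- stated objective: alternative
-- what changed: Replaces A's single streaming pass with mutable current-section/buffer state and a trailing flush by a segment-consuming decomposition: strip all lines up front, drop the prefix before the first header, then repeatedly pop one header and its body span and assign it immediately, so no carried state or end-of-loop flush exists.
import Mathlib
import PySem

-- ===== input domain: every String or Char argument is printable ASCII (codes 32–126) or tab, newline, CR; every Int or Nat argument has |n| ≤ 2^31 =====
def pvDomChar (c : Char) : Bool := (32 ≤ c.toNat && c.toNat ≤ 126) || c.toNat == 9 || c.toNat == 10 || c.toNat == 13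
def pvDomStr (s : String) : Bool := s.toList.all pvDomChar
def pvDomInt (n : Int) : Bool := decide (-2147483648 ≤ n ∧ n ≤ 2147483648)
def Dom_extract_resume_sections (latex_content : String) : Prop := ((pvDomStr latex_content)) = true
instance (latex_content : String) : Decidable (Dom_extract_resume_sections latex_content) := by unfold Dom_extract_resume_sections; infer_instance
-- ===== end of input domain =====

-- B replaces A's streaming pass (current-section state, buffer, trailing flush) by a
-- segment-consuming decomposition: strip all lines, drop the prefix before the first
-- header, then repeatedly take one header and its body span and assign it immediately.
-- Same cost; objective: alternative decomposition.

-- ===== PORT A =====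
-- loop body of A: strip the line, on a header flush the buffer and reclassify, else append
def pvStepA (st : PySem.Dict String String × Option String × List String) (line : String) :
    PySem.Dict String String × Option String × List String :=
  let line := PySem.Str.strip line
  if PySem.Str.isIn "\\section{" (PySem.Str.lower line) || PySem.Str.isIn "\\section*{" (PySem.Str.lower line) then
    let sections :=
      match st.2.1 with
      | some cs => if st.2.2 ≠ [] then st.1.insert cs (PySem.Str.join "\n" st.2.2) else st.1
      | none => st.1
    let lowerLine := PySem.Str.lower line
    let cur : Option String :=
      if PySem.Str.isIn "skill" lowerLine then some "skills"
      else if PySem.Str.isIn "experience" lowerLine || PySem.Str.isIn "work" lowerLine then some "experience"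
      else if PySem.Str.isIn "education" lowerLine then some "education"
      else none
    (sections, cur, [])
  else
    match st.2.1 with
    | some _ => (st.1, st.2.1, st.2.2 ++ [line])
    | none => st

def extract_resume_sections (latex_content : String) : List (String × String) :=
  let sections : PySem.Dict String String :=
    ((PySem.Dict.empty.insert "skills" "").insert "experience" "").insert "education" ""
  -- split? with separator "\n" (nonempty) is always `some`
  let lines := (PySem.Str.split? latex_content "\n").getD []
  let st := lines.foldl pvStepA (sections, none, [])
  let sections :=
    match st.2.1 with
    | some cs => if st.2.2 ≠ [] then st.1.insert cs (PySem.Str.join "\n" st.2.2) else st.1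
    | none => st.1
  sections.items

-- ===== PORT B =====
-- Source B's _is_header
def pvIsHeader (line : String) : Bool :=
  let ll := PySem.Str.lower line
  PySem.Str.isIn "\\section{" ll || PySem.Str.isIn "\\section*{" ll

-- Source B's _classify
def pvClassify (line : String) : Option String :=
  let ll := PySem.Str.lower line
  if PySem.Str.isIn "skill" ll then some "skills"
  else if PySem.Str.isIn "experience" ll || PySem.Str.isIn "work" ll then some "experience"
  else if PySem.Str.isIn "education" ll then some "education"
  else none

-- Source B's inner while loop: pop body lines until the next header; returns (body, rest)
def pvBodyLoop : List String → List String × List String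
  | [] => ([], [])
  | l :: ls =>
    if pvIsHeader l then ([], l :: ls)
    else
      let p := pvBodyLoop ls
      (l :: p.1, p.2)

-- termination measure for pvSegLoop (cited by its decreasing_by)
theorem pvBodyLoop_snd_length : ∀ ls : List String, (pvBodyLoop ls).2.length ≤ ls.length := by
  intro ls
  induction ls with
  | nil => simp [pvBodyLoop]
  | cons l ls ih =>
    simp only [pvBodyLoop]
    split
    · simp
    · simpa using Nat.le_succ_of_le ih

-- Source B's outer while loop: consume one (header, body) segment per step
def pvSegLoop : PySem.Dict String String → List String → PySem.Dict String String
  | d, [] => d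
  | d, h :: t =>
    let p := pvBodyLoop t
    let d' :=
      match pvClassify h with
      | some k => if p.1 ≠ [] then d.insert k (PySem.Str.join "\n" p.1) else d
      | none => d
    pvSegLoop d' p.2
termination_by _ ls => ls.length
decreasing_by exact Nat.lt_succ_of_le (pvBodyLoop_snd_length t)

def extract_resume_sections_alt (latex_content : String) : List (String × String) :=
  let sections : PySem.Dict String String :=
    ((PySem.Dict.empty.insert "skills" "").insert "experience" "").insert "education" ""
  let stripped := ((PySem.Str.split? latex_content "\n").getD []).map PySem.Str.strip
  let rest := stripped.dropWhile (fun l => !pvIsHeader l)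
  (pvSegLoop sections rest).items

-- ===== PRECONDITION & SPEC =====
def Spec_extract_resume_sections (latex_content : String) (out : List (String × String)) : Prop := out = extract_resume_sections_alt latex_content
instance (latex_content : String) (out : List (String × String)) : Decidable (Spec_extract_resume_sections latex_content out) := by unfold Spec_extract_resume_sections; infer_instance

-- ===== CLAIM (what is proved, stated in full; the proofs are below) =====
def Claim_equal_extract_resume_sections : Prop := ∀ (latex_content : String), Dom_extract_resume_sections latex_content → Spec_extract_resume_sections latex_content (extract_resume_sections latex_content)

-- ===== LEMMAS AND PROOFS =====

-- A's flush, as a function of the (dict, current section, buffer) state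
def pvAssign (d : PySem.Dict String String) (c : Option String) (body : List String) :
    PySem.Dict String String :=
  match c with
  | some k => if body ≠ [] then d.insert k (PySem.Str.join "\n" body) else d
  | none => d

def pvFinal (st : PySem.Dict String String × Option String × List String) :
    PySem.Dict String String :=
  pvAssign st.1 st.2.1 st.2.2

-- A's loop body on an already-stripped line
def pvStepS (st : PySem.Dict String String × Option String × List String) (line : String) :
    PySem.Dict String String × Option String × List String :=
  if pvIsHeader line then
    (pvFinal st, pvClassify line, [])
  else
    match st.2.1 with
    | some _ => (st.1, st.2.1, st.2.2 ++ [line])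
    | none => st

theorem pvStepA_eq (st : PySem.Dict String String × Option String × List String) (l : String) :
    pvStepA st l = pvStepS st (PySem.Str.strip l) := by
  obtain ⟨d, c, buf⟩ := st
  dsimp only [pvStepA, pvStepS, pvIsHeader, pvClassify, pvFinal, pvAssign]
  cases c <;> rfl

theorem pvFinal_eq (st : PySem.Dict String String × Option String × List String) :
    (match st.2.1 with
      | some cs => if st.2.2 ≠ [] then st.1.insert cs (PySem.Str.join "\n" st.2.2) else st.1
      | none => st.1) = pvFinal st := by
  obtain ⟨d, c, buf⟩ := st
  cases c <;> rfl

theorem pvSegLoop_cons (d : PySem.Dict String String) (h : String) (t : List String) :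
    pvSegLoop d (h :: t) =
      pvSegLoop (pvAssign d (pvClassify h) (pvBodyLoop t).1) (pvBodyLoop t).2 := by
  rw [pvSegLoop]
  cases pvClassify h <;> simp [pvAssign]

-- the heart of the equivalence: A's fold over a tail of (stripped) lines, starting in either
-- a classified state (with a pending buffer) or the unclassified empty-buffer state, computes
-- exactly B's remaining segment assignments
theorem pvMain : ∀ ls : List String,
    (∀ (d : PySem.Dict String String) (k : String) (buf : List String),
        pvFinal (ls.foldl pvStepS (d, some k, buf)) =
          pvSegLoop (pvAssign d (some k) (buf ++ (pvBodyLoop ls).1)) (pvBodyLoop ls).2)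
    ∧ (∀ d : PySem.Dict String String,
        pvFinal (ls.foldl pvStepS (d, none, ([] : List String))) =
          pvSegLoop d (pvBodyLoop ls).2) := by
  intro ls
  induction ls with
  | nil =>
    constructor
    · intro d k buf
      simp [pvBodyLoop, pvSegLoop, pvFinal]
    · intro d
      simp [pvBodyLoop, pvSegLoop, pvFinal, pvAssign]
  | cons l ls ih =>
    obtain ⟨ihS, ihZ⟩ := ih
    constructor
    · intro d k buf
      cases h : pvIsHeader l with
      | true =>
        have hstep : pvStepS (d, some k, buf) l = (pvAssign d (some k) buf, pvClassify l, []) := by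
          simp [pvStepS, h, pvFinal]
        have hb : pvBodyLoop (l :: ls) = ([], l :: ls) := by simp [pvBodyLoop, h]
        rw [List.foldl_cons, hstep, hb, List.append_nil, pvSegLoop_cons]
        cases hc : pvClassify l with
        | none => simpa [pvAssign] using ihZ (pvAssign d (some k) buf)
        | some k' => simpa using ihS (pvAssign d (some k) buf) k' []
      | false =>
        have hstep : pvStepS (d, some k, buf) l = (d, some k, buf ++ [l]) := by
          simp [pvStepS, h]
        have hb : pvBodyLoop (l :: ls) = (l :: (pvBodyLoop ls).1, (pvBodyLoop ls).2) := by
          simp [pvBodyLoop, h]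
        rw [List.foldl_cons, hstep, hb, ihS d k (buf ++ [l])]
        simp
    · intro d
      cases h : pvIsHeader l with
      | true =>
        have hstep : pvStepS (d, none, ([] : List String)) l = (d, pvClassify l, []) := by
          simp [pvStepS, h, pvFinal, pvAssign]
        have hb : pvBodyLoop (l :: ls) = ([], l :: ls) := by simp [pvBodyLoop, h]
        rw [List.foldl_cons, hstep, hb, pvSegLoop_cons]
        cases hc : pvClassify l with
        | none => simpa [pvAssign] using ihZ d
        | some k' => simpa using ihS d k' []
      | false =>
        have hstep : pvStepS (d, none, ([] : List String)) l = (d, none, []) := by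
          simp [pvStepS, h]
        have hb : pvBodyLoop (l :: ls) = (l :: (pvBodyLoop ls).1, (pvBodyLoop ls).2) := by
          simp [pvBodyLoop, h]
        rw [List.foldl_cons, hstep, hb]
        exact ihZ d

theorem pvBodyLoop_snd_dropWhile : ∀ ls : List String,
    (pvBodyLoop ls).2 = ls.dropWhile (fun l => !pvIsHeader l) := by
  intro ls
  induction ls with
  | nil => simp [pvBodyLoop]
  | cons l ls ih =>
    by_cases h : pvIsHeader l = true
    · simp [pvBodyLoop, List.dropWhile, h]
    · simp [pvBodyLoop, List.dropWhile, h, ih]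

-- ===== VERDICT (by name: the statement is the Claim_ definition above) =====
theorem extract_resume_sections_spec : Claim_equal_extract_resume_sections := by
  intro latex_content _
  unfold Spec_extract_resume_sections
  unfold extract_resume_sections extract_resume_sections_alt
  dsimp only
  have hstepA : pvStepA = fun st l => pvStepS st (PySem.Str.strip l) :=
    funext fun st => funext fun l => pvStepA_eq st l
  rw [hstepA, ← List.foldl_map]
  simp only [pvFinal_eq]
  rw [(pvMain _).2, pvBodyLoop_snd_dropWhile]
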